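-- pv_equiv track=rewrite | github.com/WaterlinePL/hmse_hydrological_models | hydrus/file_processing/text_file_processor.py | _read_value_from_col
-- ===== SOURCE A (Python) =====
-- def _read_value_from_col(line: str, col_idx: int):
--     i = -1
--     current_value = None
--     value_start_idx = -1
--     parts = line.split(' ')
--     for p in parts:
--         value_start_idx += 1
--         if len(p) > 0:
--             i += 1
--             if i == col_idx:
--                 current_value = p
--                 break
--             else:
--                 value_start_idx += len(p)
--     return current_value, value_start_idx
-- ===== SOURCE B (Python) =====
-- def _read_value_from_col(line: str, col_idx: int):
--     # Single char-level scan over maximal runs of non-space characters: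
--     # no split, no per-part index bookkeeping.
--     n = len(line)
--     pos = 0
--     k = -1
--     while pos < n:
--         if line[pos] == ' ':
--             pos += 1
--             continue
--         end = pos
--         while end < n and line[end] != ' ':
--             end += 1
--         k += 1
--         if k == col_idx:
--             return line[pos:end], pos
--         pos = end
--     return None, n
-- ===== Notes on version B (the rewrite author's own statement) =====
-- stated objective: simpler
-- what changed: B replaces split(' ') plus manual +1-per-separator/+len-per-token index accounting with a single char-level scan over maximal non-space runs, returning the run and its position directly.
import Mathlib
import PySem

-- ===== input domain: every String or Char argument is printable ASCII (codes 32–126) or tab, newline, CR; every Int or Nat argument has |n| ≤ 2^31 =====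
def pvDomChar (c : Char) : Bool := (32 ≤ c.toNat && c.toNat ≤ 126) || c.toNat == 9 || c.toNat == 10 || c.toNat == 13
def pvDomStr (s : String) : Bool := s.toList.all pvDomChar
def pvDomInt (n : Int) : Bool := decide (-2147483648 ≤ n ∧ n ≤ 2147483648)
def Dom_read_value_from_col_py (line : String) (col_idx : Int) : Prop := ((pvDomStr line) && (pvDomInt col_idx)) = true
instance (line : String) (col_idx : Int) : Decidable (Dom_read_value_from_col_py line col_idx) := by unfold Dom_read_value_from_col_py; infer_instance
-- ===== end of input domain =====

-- B replaces split(' ')+index bookkeeping by one char-level scan over non-space runs (simpler; return value equivalence, A is total).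

-- ===== PORT A =====
-- loop over parts of line.split(' ') carrying (i, value_start_idx); break = return
def rvLoopA (col_idx : Int) : List (List Char) → Int → Int → Option String × Int
  | [], _i, v => (none, v)
  | p :: rest, i, v =>
    let v := v + 1
    if 0 < p.length then
      let i := i + 1
      if i = col_idx then (some (String.ofList p), v)
      else rvLoopA col_idx rest i (v + (p.length : Int))
    else rvLoopA col_idx rest i v

def read_value_from_col_py (line : String) (col_idx : Int) : Option String × Int :=
  rvLoopA col_idx (PySem.Chars.splitOn line.toList [' ']) (-1) (-1)

-- ===== PORT B =====
-- while pos < n: skip a space, or take the maximal non-space run starting at pos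
def rvScanB (col_idx : Int) : List Char → Int → Int → Option String × Int
  | [], pos, _k => (none, pos)
  | c :: rest, pos, k =>
    if c = ' ' then rvScanB col_idx rest (pos + 1) k
    else
      let tok := (c :: rest).takeWhile (fun x => x != ' ')
      let k := k + 1
      if k = col_idx then (some (String.ofList tok), pos)
      else rvScanB col_idx ((c :: rest).dropWhile (fun x => x != ' ')) (pos + (tok.length : Int)) k
  termination_by cs => cs.length
  decreasing_by
  · simp
  · simp only [List.dropWhile_cons]
    have hc : (c != ' ') = true := by simpa using (by assumption : ¬ c = ' ')
    rw [if_pos hc]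
    have := List.length_dropWhile_le (p := fun x => x != ' ') (l := rest)
    simpa using Nat.lt_succ_of_le this

def read_value_from_col_py_alt (line : String) (col_idx : Int) : Option String × Int :=
  rvScanB col_idx line.toList 0 (-1)

-- ===== PRECONDITION & SPEC =====
def Spec_read_value_from_col_py (line : String) (col_idx : Int) (out : Option String × Int) : Prop := out = read_value_from_col_py_alt line col_idx
instance (line : String) (col_idx : Int) (out : Option String × Int) : Decidable (Spec_read_value_from_col_py line col_idx out) := by unfold Spec_read_value_from_col_py; infer_instance

-- ===== CLAIM (what is proved, stated in full; the proofs are below) =====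
def Claim_equal_read_value_from_col_py : Prop := ∀ (line : String) (col_idx : Int), Dom_read_value_from_col_py line col_idx → Spec_read_value_from_col_py line col_idx (read_value_from_col_py line col_idx)

-- ===== LEMMAS AND PROOFS =====

-- reference splitter: what line.split(' ') produces, as the obvious structural recursion
def rvS : List Char → List (List Char)
  | [] => [[]]
  | c :: r => if c = ' ' then [] :: rvS r else (rvS r).modifyHead (c :: ·)

theorem rvS_ne_nil (cs : List Char) : rvS cs ≠ [] := by
  induction cs with
  | nil => simp [rvS]
  | cons c r ih =>
    simp only [rvS]
    split
    · simp
    · cases h : rvS r with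
      | nil => exact absurd h ih
      | cons a t => simp [List.modifyHead]

theorem rvGo_spec : ∀ (fuel : Nat) (cs cur : List Char) (acc : List (List Char)),
    cs.length < fuel →
    PySem.Chars.splitOn.go [' '] fuel cs cur acc
      = acc.reverse ++ (rvS cs).modifyHead (cur.reverse ++ ·) := by
  intro fuel
  induction fuel with
  | zero => intro cs cur acc h; omega
  | succ f ih =>
    intro cs cur acc h
    cases cs with
    | nil => simp [PySem.Chars.splitOn.go, rvS]
    | cons c r =>
      by_cases hc : c = ' '
      · subst hc
        rw [show PySem.Chars.splitOn.go [' '] (f+1) (' ' :: r) cur acc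
              = PySem.Chars.splitOn.go [' '] f r [] (cur.reverse :: acc) from by
            simp [PySem.Chars.splitOn.go, List.isPrefixOf]]
        rw [ih r [] (cur.reverse :: acc) (by simpa using Nat.lt_of_succ_lt_succ h)]
        simp only [rvS, List.reverse_cons, List.reverse_nil, List.nil_append,
          List.modifyHead]
        cases hS : rvS r <;> simp
      · rw [show PySem.Chars.splitOn.go [' '] (f+1) (c :: r) cur acc
              = PySem.Chars.splitOn.go [' '] f r (c :: cur) acc from by
            simp [PySem.Chars.splitOn.go, List.isPrefixOf, (by simpa using Ne.symm hc : (' ' == c) = false)]]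
        rw [ih r (c :: cur) acc (by simpa using Nat.lt_of_succ_lt_succ h)]
        simp only [rvS, if_neg hc]
        cases hS : rvS r with
        | nil => exact absurd hS (rvS_ne_nil r)
        | cons a t => simp [List.modifyHead]

theorem rvSplitOn_eq_rvS (cs : List Char) : PySem.Chars.splitOn cs [' '] = rvS cs := by
  have h := rvGo_spec (cs.length + 1) cs [] [] (by omega)
  simp only [PySem.Chars.splitOn] at h ⊢
  rw [h]
  cases hS : rvS cs <;> simp

-- for a non-space head the first part is the maximal non-space run, the rest restarts after the separator
theorem rvS_cons_of_ne : ∀ (r : List Char) (c : Char), c ≠ ' ' →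
    rvS (c :: r) = ((c :: r).takeWhile (fun x => x != ' ')) ::
      (match (c :: r).dropWhile (fun x => x != ' ') with
        | [] => []
        | _ :: t => rvS t) := by
  intro r
  induction r with
  | nil =>
    intro c hc
    have hb : (c != ' ') = true := by simp [hc]
    simp [rvS, List.takeWhile, List.dropWhile, hb, hc]
  | cons c' t ih =>
    intro c hc
    have hb : (c != ' ') = true := by simp [hc]
    by_cases hc' : c' = ' '
    · subst hc'
      simp [rvS, List.takeWhile, List.dropWhile, hb, hc]
    · have hb' : (c' != ' ') = true := by simp [hc']
      have h1 : rvS (c :: c' :: t) = (rvS (c' :: t)).modifyHead (c :: ·) := by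
        simp [rvS, hc]
      rw [h1, ih c' hc']
      simp [List.takeWhile, List.dropWhile, hb, hb', List.modifyHead]

theorem rvMain : ∀ (n : Nat) (cs : List Char), cs.length ≤ n → ∀ (col pos i : Int),
    rvScanB col cs pos i = rvLoopA col (rvS cs) i (pos - 1) := by
  intro n
  induction n with
  | zero =>
    intro cs h col pos i
    have : cs = [] := by cases cs <;> simp_all
    subst this
    simp [rvScanB, rvS, rvLoopA]
  | succ m ih =>
    intro cs h col pos i
    cases cs with
    | nil => simp [rvScanB, rvS, rvLoopA]
    | cons c r =>
      by_cases hc : c = ' '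
      · subst hc
        rw [show rvScanB col (' ' :: r) pos i = rvScanB col r (pos + 1) i from by
              simp [rvScanB]]
        rw [ih r (by simpa using Nat.le_of_succ_le_succ h) col (pos + 1) i]
        simp only [rvS]
        rw [show pos + 1 - 1 = pos - 1 + 1 from by omega]
        simp [rvLoopA]
      · rw [rvS_cons_of_ne r c hc]
        have hb : (c != ' ') = true := by simp [hc]
        have htok : (c :: r).takeWhile (fun x => x != ' ') = c :: r.takeWhile (fun x => x != ' ') := by
          simp [List.takeWhile, hb]
        have hlen : 0 < ((c :: r).takeWhile (fun x => x != ' ')).length := by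
          rw [htok]; simp
        rw [show rvScanB col (c :: r) pos i
              = (if i + 1 = col then (some (String.ofList ((c :: r).takeWhile (fun x => x != ' '))), pos)
                 else rvScanB col ((c :: r).dropWhile (fun x => x != ' '))
                       (pos + (((c :: r).takeWhile (fun x => x != ' ')).length : Int)) (i + 1)) from by
            rw [rvScanB]; simp [hc]]
        simp only [rvLoopA, if_pos hlen]
        have hpos : pos - 1 + 1 = pos := by omega
        rw [hpos]
        by_cases hcol : i + 1 = col
        · simp [hcol]
        · rw [if_neg hcol, if_neg hcol]
          cases hd : (c :: r).dropWhile (fun x => x != ' ') with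
          | nil =>
            simp [rvScanB, rvLoopA]
          | cons d t =>
            have hd' : d = ' ' := by
              have := List.head_dropWhile_not (p := fun x => x != ' ') (l := c :: r)
                (by simp [hd])
              simp [hd] at this
              simpa using this
            subst hd'
            have hlt : t.length ≤ m := by
              have h1 : ((c :: r).dropWhile (fun x => x != ' ')).length ≤ r.length + 1 := by
                simpa using List.length_dropWhile_le (p := fun x => x != ' ') (l := c :: r)
              rw [hd] at h1
              simp at h1
              have h2 : (' ' :: t).length ≤ r.length + 1 := by simpa using h1
              have h3 : r.length + 1 ≤ m + 1 := by simpa using h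
              -- t.length + 1 ≤ r.length + 1 ≤ m + 1, and t.length < dropWhile length... need strict
              -- dropWhile (c::r) with c ≠ ' ' = dropWhile r
              have h4 : (c :: r).dropWhile (fun x => x != ' ') = r.dropWhile (fun x => x != ' ') := by
                simp [List.dropWhile, hb]
              rw [h4] at hd
              have h5 : (r.dropWhile (fun x => x != ' ')).length ≤ r.length :=
                List.length_dropWhile_le _ _
              rw [hd] at h5
              simp at h5
              omega
            rw [show rvScanB col (' ' :: t) (pos + (((c :: r).takeWhile (fun x => x != ' ')).length : Int)) (i + 1)
                  = rvScanB col t (pos + (((c :: r).takeWhile (fun x => x != ' ')).length : Int) + 1) (i + 1) from by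
                simp [rvScanB]]
            rw [ih t hlt col _ (i + 1)]
            have : pos + (((c :: r).takeWhile (fun x => x != ' ')).length : Int) + 1 - 1
                 = pos + (((c :: r).takeWhile (fun x => x != ' ')).length : Int) := by omega
            rw [this]

-- ===== VERDICT (by name: the statement is the Claim_ definition above) =====
theorem read_value_from_col_py_spec : Claim_equal_read_value_from_col_py := by
  intro line col_idx _
  unfold Spec_read_value_from_col_py read_value_from_col_py read_value_from_col_py_alt
  rw [rvSplitOn_eq_rvS, rvMain line.toList.length line.toList (le_refl _) col_idx 0 (-1)]
  norm_num
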